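-- pv_equiv track=rewrite | github.com/Richtermnd/Exams | tasks/task05/homework/n10.py | f
-- ===== SOURCE A (Python) =====
-- def f(n):
--     r = bin(n)[2:]
--     if sum(int(x) for x in r) % 2:
--         r += '1'
--         r = '11' + r[2:]
--     else:
--         r += '0'
--         r = '10' + r[2:]
--
--     return int(r, 2)
-- ===== SOURCE B (Python) =====
-- def f(n):
--     # integer bit arithmetic instead of binary-string editing
--     p = 0
--     m = n
--     while m:
--         p ^= m & 1
--         m >>= 1
--     W = max(2, n.bit_length() + 1)
--     return (2 * n + p) % (1 << (W - 2)) + (1 << (W - 1)) + (p << (W - 2))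
-- ===== Notes on version B (the rewrite author's own statement) =====
-- stated objective: simpler
-- what changed: Replaced A's binary-string building and slicing (bin/str concat/int(r,2)) by pure integer bit arithmetic: parity via a xor loop, width via bit_length, and the result assembled with modulus, a power of two and a shifted parity bit.
-- outside the precondition, e.g. on f(-3): A raises ValueError, B does not finish within the time limit
import Mathlib
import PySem

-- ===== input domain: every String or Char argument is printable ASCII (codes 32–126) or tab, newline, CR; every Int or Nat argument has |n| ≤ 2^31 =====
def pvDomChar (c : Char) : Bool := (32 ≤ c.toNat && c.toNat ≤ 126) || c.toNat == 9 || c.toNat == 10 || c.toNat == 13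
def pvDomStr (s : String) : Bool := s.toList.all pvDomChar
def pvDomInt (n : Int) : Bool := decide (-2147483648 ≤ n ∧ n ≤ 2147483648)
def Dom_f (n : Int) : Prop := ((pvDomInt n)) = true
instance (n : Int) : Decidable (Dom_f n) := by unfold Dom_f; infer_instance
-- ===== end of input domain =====

-- B replaces A's binary-string editing by pure integer bit arithmetic (parity + bit_length + modulus): simpler, no strings.

-- ===== PORT A =====
-- binary digits of a positive integer, MSB first (the zero case is handled at the call site)
def binDigits : Nat → List Nat
  | 0 => []
  | (n+1) => binDigits ((n+1)/2) ++ [(n+1) % 2]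
decreasing_by exact Nat.div_lt_self (Nat.succ_pos n) one_lt_two

-- int(r, 2) on a digit list
def fromBin (l : List Nat) : Nat := l.foldl (fun a d => 2*a + d) 0

def f (n : Int) : Int :=
  let m := n.toNat                                  -- faithful for n ≥ 0 (= Pre_f); A raises ValueError on n < 0
  let r := if m = 0 then [0] else binDigits m       -- r = bin(n)[2:]
  let v : Nat :=
    if r.sum % 2 = 1 then                           -- sum(int(x) for x in r) % 2
      fromBin ([1, 1] ++ (r ++ [1]).drop 2)         -- r += '1'; r = '11' + r[2:]
    else
      fromBin ([1, 0] ++ (r ++ [0]).drop 2)         -- r += '0'; r = '10' + r[2:]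
  (v : Int)                                         -- int(r, 2)

-- ===== PORT B =====
-- the while-loop of Source B: xor of the bits of m
def popXor : Nat → Nat
  | 0 => 0
  | (n+1) => ((n+1) % 2) ^^^ popXor ((n+1)/2)
decreasing_by exact Nat.div_lt_self (Nat.succ_pos n) one_lt_two

-- n.bit_length()
def bitLen : Nat → Nat
  | 0 => 0
  | (n+1) => bitLen ((n+1)/2) + 1
decreasing_by exact Nat.div_lt_self (Nat.succ_pos n) one_lt_two

def f_alt (n : Int) : Int :=
  let m := n.toNat
  let p := popXor m
  let W := max 2 (bitLen m + 1)
  (((2*m + p) % 2^(W-2) + 2^(W-1) + p * 2^(W-2) : Nat) : Int)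

-- ===== PRECONDITION & SPEC =====
-- Pre_f excludes n < 0, on which A raises ValueError (int('-') inside the generator).
def Pre_f (n : Int) : Prop := 0 ≤ n
instance (n : Int) : Decidable (Pre_f n) := by unfold Pre_f; infer_instance
def pvWitness_f : Int := 5

def Spec_f (n : Int) (out : Int) : Prop := out = f_alt n
instance (n : Int) (out : Int) : Decidable (Spec_f n out) := by unfold Spec_f; infer_instance

-- ===== CLAIM =====
def Claim_equal_f : Prop := ∀ (n : Int), Dom_f n → Pre_f n → Spec_f n (f n)

-- ===== LEMMAS AND PROOFS =====

theorem foldl_bin (l : List Nat) (a : Nat) :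
    l.foldl (fun a d => 2*a + d) a = a * 2^l.length + fromBin l := by
  induction l generalizing a with
  | nil => simp [fromBin]
  | cons d t ih =>
    simp only [List.foldl_cons, List.length_cons, fromBin] at *
    rw [ih (2*a + d), ih (2*0 + d)]
    ring

theorem fromBin_append (l₁ l₂ : List Nat) :
    fromBin (l₁ ++ l₂) = fromBin l₁ * 2^l₂.length + fromBin l₂ := by
  unfold fromBin
  rw [List.foldl_append, foldl_bin]
  rfl

theorem fromBin_lt (l : List Nat) (h : ∀ d ∈ l, d < 2) : fromBin l < 2^l.length := by
  induction l with
  | nil => simp [fromBin]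
  | cons d t ih =>
    have hd : d < 2 := h d (by simp)
    have ht := ih (fun x hx => h x (by simp [hx]))
    have hc : fromBin (d :: t) = d * 2^t.length + fromBin t := by
      have := fromBin_append [d] t
      simpa [fromBin] using this
    rw [hc]
    simp only [List.length_cons, pow_succ]
    nlinarith

theorem binDigits_spec (m : Nat) :
    fromBin (binDigits m) = m ∧ (binDigits m).length = bitLen m ∧
      ∀ d ∈ binDigits m, d < 2 := by
  induction m using binDigits.induct with
  | case1 => simp [binDigits, fromBin, bitLen]
  | case2 n ih =>
    obtain ⟨h1, h2, h3⟩ := ih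
    refine ⟨?_, ?_, ?_⟩
    · rw [binDigits, fromBin_append, h1]
      simp [fromBin]
      omega
    · rw [binDigits, bitLen]
      simp [h2]
    · intro d hd
      rw [binDigits] at hd
      rcases List.mem_append.mp hd with h | h
      · exact h3 d h
      · simp at h; omega

theorem popXor_lt (m : Nat) : popXor m < 2 := by
  induction m using popXor.induct with
  | case1 => simp [popXor]
  | case2 n ih =>
    rw [popXor]
    interval_cases h2 : popXor ((n+1)/2) <;>
      rcases (show (n+1) % 2 = 0 ∨ (n+1) % 2 = 1 by omega) with h1 | h1 <;> rw [h1] <;> decide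

theorem xor_mod2 (a b : Nat) (ha : a < 2) (hb : b < 2) : a ^^^ b = (a + b) % 2 := by
  interval_cases a <;> interval_cases b <;> rfl

theorem sum_binDigits_parity (m : Nat) : (binDigits m).sum % 2 = popXor m := by
  induction m using binDigits.induct with
  | case1 => simp [binDigits, popXor]
  | case2 n ih =>
    rw [binDigits, popXor, List.sum_append]
    simp only [List.sum_cons, List.sum_nil, Nat.add_zero]
    rw [← ih, xor_mod2 _ _ (Nat.mod_lt _ (by omega)) (Nat.mod_lt _ (by omega))]
    omega

theorem bitLen_pos (m : Nat) (hm : 0 < m) : 0 < bitLen m := by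
  cases m with
  | zero => omega
  | succ n => rw [bitLen]; omega

-- the core identity on naturals: A's string surgery equals B's arithmetic
theorem main_nat (m : Nat) :
    (let r := if m = 0 then [0] else binDigits m
     if r.sum % 2 = 1 then fromBin ([1, 1] ++ (r ++ [1]).drop 2)
     else fromBin ([1, 0] ++ (r ++ [0]).drop 2)) =
    (let p := popXor m
     let W := max 2 (bitLen m + 1)
     (2*m + p) % 2^(W-2) + 2^(W-1) + p * 2^(W-2)) := by
  rcases Nat.eq_zero_or_pos m with h0 | hm
  · subst h0
    norm_num [popXor, bitLen, fromBin]
  · obtain ⟨h1, h2, h3⟩ := binDigits_spec m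
    have hL : 0 < bitLen m := bitLen_pos m hm
    set L := bitLen m with hLdef
    have hne : m ≠ 0 := by omega
    simp only [hne, if_false]
    have hp2 := popXor_lt m
    have hpar := sum_binDigits_parity m
    -- common computation: append a parity digit p < 2 and replace the two top digits by 1, p
    have key : ∀ p : Nat, p < 2 →
        fromBin ([1, p] ++ (binDigits m ++ [p]).drop 2) =
          (2*m + p) % 2^(L-1) + 2^L + p * 2^(L-1) := by
      intro p hp
      set l := binDigits m ++ [p] with hl
      have hlen : l.length = L + 1 := by simp [hl, h2]
      have hall : ∀ d ∈ l, d < 2 := by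
        intro d hd
        rcases List.mem_append.mp hd with h | h
        · exact h3 d h
        · simp at h; omega
      have hval : fromBin l = 2*m + p := by
        rw [hl, fromBin_append, h1]
        simp [fromBin]
        ring
      have hdlen : (l.drop 2).length = L - 1 := by simp [hlen]
      have hsplit : fromBin l = fromBin (l.take 2) * 2^(l.drop 2).length + fromBin (l.drop 2) := by
        conv_lhs => rw [← List.take_append_drop 2 l]
        rw [fromBin_append]
      have hdlt : fromBin (l.drop 2) < 2^(L-1) := by
        have := fromBin_lt (l.drop 2) (fun d hd => hall d (List.mem_of_mem_drop hd))
        rwa [hdlen] at this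
      have hdrop : fromBin (l.drop 2) = (2*m + p) % 2^(L-1) := by
        rw [← hval, hsplit, hdlen, Nat.add_comm, Nat.add_mul_mod_self_right,
          Nat.mod_eq_of_lt hdlt]
      rw [fromBin_append, hdlen, hdrop]
      have h12 : fromBin [1, p] = 2 + p := by
        simp [fromBin]
      have hLL : 2^L = 2 * 2^(L-1) := by
        rw [← pow_succ']
        congr 1
        omega
      rw [h12, hLL]
      ring
    have hW : max 2 (L + 1) = L + 1 := by omega
    simp only [hW]
    have hW2 : L + 1 - 2 = L - 1 := by omega
    have hW1 : L + 1 - 1 = L := by omega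
    rw [hW2, hW1]
    by_cases hp : (binDigits m).sum % 2 = 1
    · rw [if_pos hp]
      have hpv : popXor m = 1 := by omega
      rw [hpv]
      have := key 1 (by omega)
      omega
    · rw [if_neg hp]
      have hpv : popXor m = 0 := by
        have : (binDigits m).sum % 2 < 2 := Nat.mod_lt _ (by omega)
        omega
      rw [hpv]
      have := key 0 (by omega)
      omega

-- ===== VERDICT =====
theorem f_spec : Claim_equal_f := by
  intro n _ _
  show f n = f_alt n
  unfold f f_alt
  exact congrArg (fun v : Nat => (v : Int)) (main_nat n.toNat)
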